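-- pv_equiv track=rewrite | github.com/ahra1221/Algorithm | 프로그래머스/1/72410. 신규 아이디 추천/신규 아이디 추천.py | solution
-- ===== SOURCE A (Python) =====
-- def solution(new_id):
--     answer = ''
--     canuse = {"-","_","."}
--     pw = new_id.lower() #1단계
--     pw = "".join(p for p in pw if p in canuse or p.isalnum()) #2단계
--     while ".." in pw: #3단계
--         pw = pw.replace("..",".")
--     pw = pw.strip(".") #4단계
--     pw = pw if pw else "a" #5단계
--     if len(pw) >= 16: #6단계
--         pw = pw[:15]
--     pw = pw.rstrip(".")
--     while len(pw) < 3: #7단계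
--         pw += pw[-1]
--     return pw
-- ===== SOURCE B (Python) =====
-- def solution(new_id):
--     # one linear pass fuses lowercasing, filtering and '..'-collapse (A rescans with replace in a loop)
--     res = []
--     for c in new_id.lower():
--         if c.isalnum() or c in "-_":
--             res.append(c)
--         elif c == '.':
--             if not (res and res[-1] == '.'):
--                 res.append('.')
--     pw = ''.join(res).strip('.')
--     if not pw:
--         pw = 'a'
--     pw = pw[:15].rstrip('.')
--     if len(pw) < 3:
--         pw += pw[-1] * (3 - len(pw))
--     return pw
-- ===== Notes on version B (the rewrite author's own statement) =====
-- stated objective: simpler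
-- what changed: Steps 1-3 are fused into one linear pass that filters characters and collapses runs of consecutive dots by skipping a dot whenever the last kept character is already a dot, replacing A's filter comprehension plus repeated whole-string replace rescans; the final padding uses a closed-form repeat of the last character instead of A's while loop.
import Mathlib
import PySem

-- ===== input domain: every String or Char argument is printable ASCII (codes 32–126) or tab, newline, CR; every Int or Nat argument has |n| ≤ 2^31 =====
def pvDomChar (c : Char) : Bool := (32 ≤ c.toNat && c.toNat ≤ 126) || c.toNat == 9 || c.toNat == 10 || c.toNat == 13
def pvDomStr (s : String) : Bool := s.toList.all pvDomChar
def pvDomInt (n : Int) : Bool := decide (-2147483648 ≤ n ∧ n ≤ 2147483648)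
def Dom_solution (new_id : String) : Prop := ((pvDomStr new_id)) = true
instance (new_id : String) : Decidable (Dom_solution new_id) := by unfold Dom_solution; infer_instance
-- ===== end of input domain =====

-- B fuses A's filter + repeated replace("..",".") rescans into one pass that skips a '.' after a kept '.',
-- and pads with a closed-form repeat instead of A's while loop; same return value (objective: simpler).


-- ===== PORT A =====
-- Python:  while ".." in pw: pw = pw.replace("..", ".")
-- ported with fuel = pw.length: every replace removes at least one character, so this fuel always
-- suffices (proved in ddLoop_eq_collapse below); the loop body and condition are A's own.
def ddLoop : Nat → List Char → List Char
  | 0, l => l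
  | fuel+1, l =>
    if PySem.Chars.isIn ['.', '.'] l then ddLoop fuel (PySem.Chars.replace l ['.', '.'] ['.']) else l

-- Python:  while len(pw) < 3: pw += pw[-1]
-- pw is provably never empty when Python reaches this loop, so the .getD default is never used.
def padLoop (l : List Char) : List Char :=
  if l.length < 3 then padLoop (l ++ [(PySem.List.pyGet? l (-1)).getD 'a']) else l
  termination_by 3 - l.length
  decreasing_by simp; omega

def solution (new_id : String) : String :=
  let pw0 := PySem.Chars.lower new_id.toList
  let pw1 := pw0.filter (fun p => (['-', '_', '.'] : List Char).contains p || PySem.Chars.isalnum p)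
  let pw2 := ddLoop pw1.length pw1
  let pw3 := PySem.Chars.stripChars pw2 ['.']
  let pw4 := if pw3 = [] then ['a'] else pw3
  let pw5 := if 16 ≤ pw4.length then PySem.List.slice pw4 none (some 15) else pw4
  let pw6 := (pw5.reverse.dropWhile (· == '.')).reverse  -- rstrip('.') by hand (exact; PySem has no chars-rstrip)
  String.mk (padLoop pw6)

-- ===== PORT B =====
def solution_alt (new_id : String) : String :=
  let res := (PySem.Chars.lower new_id.toList).foldl (fun res c =>
      if PySem.Chars.isalnum c || (['-', '_'] : List Char).contains c then res ++ [c]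
      else if c = '.' then (if res.getLast? = some '.' then res else res ++ ['.'])
      else res) []
  let pw1 := PySem.Chars.stripChars res ['.']
  let pw2 := if pw1 = [] then ['a'] else pw1
  let pw3 := ((PySem.List.slice pw2 none (some 15)).reverse.dropWhile (· == '.')).reverse
  -- pw3 is never empty here, so the .getD default is never used (Python's pw[-1])
  if pw3.length < 3 then
    String.mk (pw3 ++ List.replicate (3 - pw3.length) ((PySem.List.pyGet? pw3 (-1)).getD 'a'))
  else String.mk pw3

-- ===== PRECONDITION & SPEC =====
def Spec_solution (new_id : String) (out : String) : Prop := out = solution_alt new_id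
instance (new_id : String) (out : String) : Decidable (Spec_solution new_id out) := by unfold Spec_solution; infer_instance

-- ===== CLAIM (what is proved, stated in full; the proofs are below) =====
def Claim_equal_solution : Prop := ∀ (new_id : String), Dom_solution new_id → Spec_solution new_id (solution new_id)

-- ===== LEMMAS AND PROOFS =====

-- one left-to-right non-overlapping pass of replace("..",".")
def rep : List Char → List Char
  | [] => []
  | [c] => [c]
  | a :: b :: t => if a = '.' ∧ b = '.' then '.' :: rep t else a :: rep (b :: t)

-- canonical result: every run of dots collapsed to a single dot
def collapse : List Char → List Char
  | [] => []
  | [c] => [c]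
  | a :: b :: t => if a = '.' ∧ b = '.' then collapse (b :: t) else a :: collapse (b :: t)

-- state-machine form of collapse, as B's single pass computes it (state = last kept char)
def sm : Option Char → List Char → List Char
  | _, [] => []
  | last, c :: t => if c = '.' ∧ last = some '.' then sm last t else c :: sm (some c) t

theorem rep_go (fuel : Nat) : ∀ (l acc : List Char), l.length ≤ fuel →
    PySem.Chars.replace.go ['.', '.'] ['.'] fuel l acc = acc.reverse ++ rep l := by
  induction fuel with
  | zero =>
    intro l acc h
    have hl : l = [] := List.length_eq_zero_iff.mp (Nat.le_zero.mp h)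
    subst hl
    rw [PySem.Chars.replace.go.eq_1, rep.eq_1]
  | succ fuel ih =>
    intro l acc h
    match l with
    | [] =>
      rw [PySem.Chars.replace.go.eq_2 _ _ _ _ (by omega), rep.eq_1, List.append_nil]
    | [c] =>
      rw [PySem.Chars.replace.go.eq_3]
      have hpre : (['.', '.'] : List Char).isPrefixOf [c] = false := by
        simp [List.isPrefixOf]
      rw [hpre]
      simp only [Bool.false_eq_true, if_false]
      rw [ih [] (c :: acc) (by simp), rep.eq_1, rep.eq_2, List.append_nil, List.reverse_cons]
    | a :: b :: t =>
      rw [PySem.Chars.replace.go.eq_3]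
      by_cases hab : a = '.' ∧ b = '.'
      · obtain ⟨ha, hb⟩ := hab; subst ha; subst hb
        have hpre : (['.', '.'] : List Char).isPrefixOf ('.' :: '.' :: t) = true := by
          simp [List.isPrefixOf]
        rw [hpre, if_pos rfl]
        rw [show List.drop (['.', '.'] : List Char).length ('.' :: '.' :: t) = t from rfl]
        rw [show (['.'] : List Char).reverse ++ acc = '.' :: acc from rfl]
        rw [ih t (('.' : Char) :: acc) (by simp at h ⊢; omega)]
        rw [rep.eq_3, if_pos ⟨rfl, rfl⟩]
        simp
      · have hpre : (['.', '.'] : List Char).isPrefixOf (a :: b :: t) = false := by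
          rcases not_and_or.mp hab with hx | hx
          · have hb : (('.' : Char) == a) = false := beq_eq_false_iff_ne.mpr (fun h => hx h.symm)
            simp [List.isPrefixOf, hb]
          · have hb : (('.' : Char) == b) = false := beq_eq_false_iff_ne.mpr (fun h => hx h.symm)
            simp [List.isPrefixOf, hb]
        rw [hpre]
        simp only [Bool.false_eq_true, if_false]
        rw [ih (b :: t) (a :: acc) (by simp at h ⊢; omega)]
        rw [rep.eq_3, if_neg hab]
        simp

theorem replace_eq_rep (l : List Char) :
    PySem.Chars.replace l ['.', '.'] ['.'] = rep l := by
  rw [PySem.Chars.replace]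
  simp only [List.isEmpty_cons, Bool.false_eq_true, if_false]
  simpa using rep_go l.length l [] le_rfl

theorem rep_length (l : List Char) : (rep l).length ≤ l.length := by
  induction l using rep.induct with
  | case1 => simp [rep]
  | case2 c => simp [rep]
  | case3 a b t hab ih => simp [rep, hab]; omega
  | case4 a b t hab ih => simp [rep, hab] at *; omega

theorem rep_length_lt (l : List Char) (h : (['.', '.'] : List Char) <:+: l) :
    (rep l).length < l.length := by
  induction l using rep.induct with
  | case1 => exact absurd (List.eq_nil_of_infix_nil h) (by simp)
  | case2 c => have := h.length_le; simp at this
  | case3 a b t hab ih =>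
    obtain ⟨ha, hb⟩ := hab; subst ha; subst hb
    have := rep_length t
    simp [rep]; omega
  | case4 a b t hab ih =>
    rcases List.infix_cons_iff.mp h with hp | hi
    · rcases hp with ⟨r, hr⟩
      simp at hr
      exact absurd ⟨hr.1.symm, hr.2.1.symm⟩ hab
    · have := ih hi
      simp [rep, hab] at *; omega

theorem collapse_of_not_dd (l : List Char) (h : ¬ (['.', '.'] : List Char) <:+: l) :
    collapse l = l := by
  induction l using collapse.induct with
  | case1 => rfl
  | case2 c => rfl
  | case3 a b t hab ih =>
    obtain ⟨ha, hb⟩ := hab; subst ha; subst hb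
    exact absurd ⟨[], t, rfl⟩ h
  | case4 a b t hab ih =>
    have : ¬ (['.', '.'] : List Char) <:+: (b :: t) := fun hi => h (List.infix_cons hi)
    simp [collapse, hab, ih this]

theorem collapse_cons_rep (l : List Char) (c : Char) :
    collapse (c :: rep l) = collapse (c :: l) := by
  match l with
  | [] => rfl
  | [a] => rfl
  | a :: b :: t =>
    by_cases hab : a = '.' ∧ b = '.'
    · obtain ⟨ha, hb⟩ := hab; subst ha; subst hb
      rw [show rep ('.' :: '.' :: t) = '.' :: rep t by simp [rep]]
      by_cases hc : c = '.'
      · subst hc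
        rw [show collapse ('.' :: '.' :: rep t) = collapse ('.' :: rep t) by simp [collapse]]
        rw [show collapse ('.' :: '.' :: '.' :: t) = collapse ('.' :: '.' :: t) by simp [collapse]]
        rw [show collapse ('.' :: '.' :: t) = collapse ('.' :: t) by simp [collapse]]
        exact collapse_cons_rep t '.'
      · rw [show collapse (c :: '.' :: rep t) = c :: collapse ('.' :: rep t) by
            simp [collapse, hc]]
        rw [show collapse (c :: '.' :: '.' :: t) = c :: collapse ('.' :: '.' :: t) by
            simp [collapse, hc]]
        rw [show collapse ('.' :: '.' :: t) = collapse ('.' :: t) by simp [collapse]]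
        rw [collapse_cons_rep t '.']
    · rw [show rep (a :: b :: t) = a :: rep (b :: t) by simp [rep, hab]]
      by_cases hca : c = '.' ∧ a = '.'
      · obtain ⟨hc, ha⟩ := hca; subst hc; subst ha
        rw [show collapse ('.' :: '.' :: rep (b :: t)) = collapse ('.' :: rep (b :: t)) by
            simp [collapse]]
        rw [show collapse ('.' :: '.' :: b :: t) = collapse ('.' :: b :: t) by simp [collapse]]
        exact collapse_cons_rep (b :: t) '.'
      · rw [show collapse (c :: a :: rep (b :: t)) = c :: collapse (a :: rep (b :: t)) by
            simp [collapse, hca]]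
        rw [show collapse (c :: a :: b :: t) = c :: collapse (a :: b :: t) by
            simp [collapse, hca]]
        rw [collapse_cons_rep (b :: t) a]
  termination_by l.length

theorem collapse_rep (l : List Char) : collapse (rep l) = collapse l := by
  match l with
  | [] => rfl
  | [a] => rfl
  | a :: b :: t =>
    by_cases hab : a = '.' ∧ b = '.'
    · obtain ⟨ha, hb⟩ := hab; subst ha; subst hb
      rw [show rep ('.' :: '.' :: t) = '.' :: rep t by simp [rep]]
      rw [show collapse ('.' :: '.' :: t) = collapse ('.' :: t) by simp [collapse]]
      exact collapse_cons_rep t '.'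
    · rw [show rep (a :: b :: t) = a :: rep (b :: t) by simp [rep, hab]]
      exact collapse_cons_rep (b :: t) a

theorem ddLoop_eq_collapse (fuel : Nat) : ∀ (l : List Char), l.length ≤ fuel →
    ddLoop fuel l = collapse l := by
  induction fuel with
  | zero =>
    intro l h
    have : l = [] := List.length_eq_zero_iff.mp (Nat.le_zero.mp h)
    subst this; rfl
  | succ fuel ih =>
    intro l h
    rw [ddLoop]
    by_cases hdd : PySem.Chars.isIn ['.', '.'] l = true
    · rw [if_pos hdd, replace_eq_rep]
      have hinf : (['.', '.'] : List Char) <:+: l := (PySem.Chars.isIn_iff_infix (sub := ['.', '.']) (s := l)).mp hdd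
      rw [ih (rep l) (by have := rep_length_lt l hinf; omega)]
      exact collapse_rep l
    · rw [if_neg hdd]
      exact (collapse_of_not_dd l
        ((PySem.Chars.isIn_eq_false_iff (sub := ['.', '.']) (s := l)).mp (Bool.eq_false_iff.mpr hdd))).symm

theorem collapse_cons_sm (l : List Char) : ∀ (c : Char),
    collapse (c :: l) = c :: sm (some c) l := by
  induction l with
  | nil => intro c; rfl
  | cons b t ih =>
    intro c
    by_cases hcb : c = '.' ∧ b = '.'
    · obtain ⟨hc, hb⟩ := hcb; subst hc; subst hb
      rw [show collapse ('.' :: '.' :: t) = collapse ('.' :: t) by simp [collapse]]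
      rw [ih '.']
      simp [sm]
    · rw [show collapse (c :: b :: t) = c :: collapse (b :: t) by simp [collapse, hcb]]
      rw [ih b]
      simp only [sm]
      rw [if_neg (by rintro ⟨hb, hc⟩; exact hcb ⟨by simpa using hc, hb⟩)]

theorem sm_none (l : List Char) : sm none l = collapse l := by
  cases l with
  | nil => rfl
  | cons c t =>
    rw [collapse_cons_sm t c]
    simp [sm]

theorem foldl_step (l : List Char) : ∀ (res : List Char),
    l.foldl (fun res c =>
      if PySem.Chars.isalnum c || (['-', '_'] : List Char).contains c then res ++ [c]
      else if c = '.' then (if res.getLast? = some '.' then res else res ++ ['.'])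
      else res) res
    = res ++ sm res.getLast?
        (l.filter (fun p => (['-', '_', '.'] : List Char).contains p || PySem.Chars.isalnum p)) := by
  induction l with
  | nil => intro res; simp [sm]
  | cons c t ih =>
    intro res
    rw [List.foldl_cons, List.filter_cons]
    by_cases h1 : (PySem.Chars.isalnum c || (['-', '_'] : List Char).contains c) = true
    · have hcdot : c ≠ '.' := by rintro rfl; revert h1; decide
      have hkeep : ((['-', '_', '.'] : List Char).contains c || PySem.Chars.isalnum c) = true := by
        rcases Bool.or_eq_true_iff.mp h1 with h | h
        · simp [h]
        · simp only [List.contains_cons] at h ⊢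
          simp at h ⊢; tauto
      rw [if_pos h1, if_pos (by simpa using hkeep), ih (res ++ [c])]
      have hno : ¬ (c = '.' ∧ res.getLast? = some '.') := fun hx => hcdot hx.1
      rw [show sm res.getLast? (c :: List.filter _ t)
            = c :: sm (some c) (List.filter (fun p => (['-', '_', '.'] : List Char).contains p
                || PySem.Chars.isalnum p) t) by rw [sm]; rw [if_neg hno]]
      simp [List.getLast?_concat]
    · rw [if_neg h1]
      by_cases h2 : c = '.'
      · subst h2
        rw [if_pos rfl]
        have hk : ((['-', '_', '.'] : List Char).contains '.' || PySem.Chars.isalnum '.') = true := by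
          decide
        rw [if_pos hk]
        by_cases h3 : res.getLast? = some '.'
        · rw [if_pos h3, ih res]
          rw [show sm res.getLast? ('.' :: List.filter _ t)
                = sm res.getLast? (List.filter (fun p => (['-', '_', '.'] : List Char).contains p
                    || PySem.Chars.isalnum p) t) by rw [sm]; rw [if_pos ⟨rfl, h3⟩]]
        · rw [if_neg h3, ih (res ++ ['.'])]
          have hno : ¬ (('.' : Char) = '.' ∧ res.getLast? = some '.') := fun hx => h3 hx.2
          rw [show sm res.getLast? ('.' :: List.filter _ t)
                = '.' :: sm (some '.') (List.filter (fun p => (['-', '_', '.'] : List Char).contains p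
                    || PySem.Chars.isalnum p) t) by rw [sm]; rw [if_neg hno]]
          simp [List.getLast?_concat]
      · have hkeep : ((['-', '_', '.'] : List Char).contains c || PySem.Chars.isalnum c) = false := by
          simp only [Bool.or_eq_true, not_or] at h1
          simp only [List.contains_cons, Bool.or_eq_false_iff]
          simp at h1 ⊢
          exact ⟨⟨fun h => h1.2.1 h, fun h => h1.2.2 h, h2⟩, h1.1⟩
        rw [if_neg h2, if_neg (by simpa using hkeep), ih res]

theorem padLoop_eq (l : List Char) :
    padLoop l = if l.length < 3
      then l ++ List.replicate (3 - l.length) ((PySem.List.pyGet? l (-1)).getD 'a')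
      else l := by
  match l with
  | [] =>
    rw [padLoop]; rw [padLoop]; rw [padLoop]; rw [padLoop]
    simp only [PySem.List.pyGet?]
    norm_num
    decide
  | [a] =>
    rw [padLoop]; rw [padLoop]; rw [padLoop]
    simp [PySem.List.pyGet?, PySem.List.pyIdx?]
  | [a, b] =>
    rw [padLoop]; rw [padLoop]
    simp [PySem.List.pyGet?, PySem.List.pyIdx?]
  | a :: b :: c :: t =>
    rw [padLoop]
    simp

theorem take15_eq (pw : List Char) :
    (if 16 ≤ pw.length then PySem.List.slice pw none (some 15) else pw)
      = PySem.List.slice pw none (some 15) := by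
  by_cases h : 16 ≤ pw.length
  · rw [if_pos h]
  · rw [if_neg h, PySem.List.slice_to pw (by norm_num)]
    exact (List.take_of_length_le (by simp; omega)).symm

-- ===== VERDICT (by name: the statement is the Claim_ definition above) =====
set_option maxHeartbeats 400000 in
theorem solution_spec : Claim_equal_solution := by
  unfold Claim_equal_solution Spec_solution
  intro s _
  unfold solution solution_alt
  simp only
  rw [foldl_step _ []]
  simp only [List.nil_append, List.getLast?_nil]
  rw [sm_none, ddLoop_eq_collapse _ _ le_rfl]
  rw [take15_eq]
  rw [padLoop_eq]
  exact apply_ite String.mk _ _ _
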